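-- pv_equiv track=rewrite | github.com/brighteast99/coding-test-problems | programmers/PCCP 기출문제/석유 시추/solution.py | solution
-- ===== SOURCE A (Python) =====
-- def solution(land):
--     n, m = len(land), len(land[0])
--     visited = [[False for __ in range(m)] for _ in range(n)]
--     oil = [0] * m
--
--     for y in range(n):
--         for x in range(m):
--             if visited[y][x]:
--                 continue
--
--             if not land[y][x]:
--                 visited[y][x] = True
--                 continue
--
--             stack = [(x, y)]
--             (range_start, range_end) = (x, x)
--             size = 0
--             while stack:
--                 (check_x, check_y) = stack.pop()
--                 if not (0 <= check_x < m) or not (0 <= check_y < n) or visited[check_y][check_x]: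
--                     continue
--
--                 visited[check_y][check_x] = True
--
--                 if not land[check_y][check_x]:
--                     continue
--
--                 size += 1
--                 range_start = min(range_start, check_x)
--                 range_end = max(range_end, check_x)
--
--                 for (dx, dy) in [(0, 1), (0, -1), (1, 0), (-1, 0)]:
--                     stack.append((check_x + dx, check_y + dy))
--
--             for range_x in range(range_start, range_end + 1):
--                 oil[range_x] += size
--
--     return max(oil)
-- ===== SOURCE B (Python) =====
-- def solution(land):
--     n, m = len(land), len(land[0])
--     done = set()
--     comps = []
--     for y in range(n):
--         for x in range(m):
--             if not land[y][x] or (x, y) in done: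
--                 continue
--             comp = {(x, y)}
--             frontier = {(x, y)}
--             while frontier:
--                 frontier = {(nx, ny)
--                             for (cx, cy) in frontier
--                             for (nx, ny) in ((cx - 1, cy), (cx + 1, cy), (cx, cy - 1), (cx, cy + 1))
--                             if 0 <= nx < m and 0 <= ny < n and land[ny][nx] and (nx, ny) not in comp}
--                 comp |= frontier
--             done |= comp
--             xs = [cx for (cx, cy) in comp]
--             comps.append((len(comp), min(xs), max(xs)))
--     return max(sum(s for (s, lo, hi) in comps if lo <= c <= hi) for c in range(m))
-- ===== Notes on version B (the rewrite author's own statement) =====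
-- stated objective: alternative
-- what changed: A's per-seed explicit-stack DFS that re-pushes raw candidate cells (including out-of-bounds and water cells) and mutates a per-column oil array in place is replaced by a per-seed frontier-set BFS over Python sets that expands whole levels at once, never touches water cells, records one (size, min_col, max_col) triple per component, and aggregates the per-column sums in one final pass.
import Mathlib
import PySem

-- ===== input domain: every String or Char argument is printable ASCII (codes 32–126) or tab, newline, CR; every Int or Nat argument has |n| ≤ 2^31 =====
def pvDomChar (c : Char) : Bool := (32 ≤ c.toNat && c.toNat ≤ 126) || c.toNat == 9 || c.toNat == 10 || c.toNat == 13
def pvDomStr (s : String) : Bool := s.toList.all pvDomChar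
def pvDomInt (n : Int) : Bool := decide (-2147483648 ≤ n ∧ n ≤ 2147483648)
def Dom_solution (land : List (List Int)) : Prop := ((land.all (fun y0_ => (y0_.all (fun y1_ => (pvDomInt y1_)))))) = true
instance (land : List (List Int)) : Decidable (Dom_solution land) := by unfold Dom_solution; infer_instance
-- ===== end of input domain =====

-- B replaces A's explicit-stack DFS (which mutates a per-column array in place) by a per-component
-- frontier-set BFS collecting (size, min_col, max_col) triples aggregated in one final pass;
-- objective: alternative (same asymptotic cost, different algorithm/data structures).


-- shared one-line grid accessor: land[y][x] (indices are bounds-checked by both programs before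
-- use; rows shorter than m — where Python would raise — are outside Pre_solution, default 0 there)
def cellAt (land : List (List Int)) (x y : Int) : Int :=
  (land.getD y.toNat []).getD x.toNat 0

-- ===== PORT A =====
-- visited[y][x] lookup / assignment on the 2-D boolean grid
def vget (v : List (List Bool)) (x y : Int) : Bool :=
  (v.getD y.toNat []).getD x.toNat false

def vset (v : List (List Bool)) (x y : Int) : List (List Bool) :=
  v.set y.toNat ((v.getD y.toNat []).set x.toNat true)

-- the `while stack:` loop of A (fuel only makes the recursion total; Python's loop terminates)
def floodA (land : List (List Int)) (n m : Int) :
    Nat → List (Int × Int) → List (List Bool) → Int → Int → Int →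
    (List (List Bool) × Int × Int × Int)
  | 0, _, v, sz, lo, hi => (v, sz, lo, hi)
  | fuel + 1, stack, v, sz, lo, hi =>
    match PySem.List.pop? stack with
    | none => (v, sz, lo, hi)
    | some (c, rest) =>
      if ¬(0 ≤ c.1 ∧ c.1 < m) ∨ ¬(0 ≤ c.2 ∧ c.2 < n) ∨ vget v c.1 c.2 then
        floodA land n m fuel rest v sz lo hi
      else
        let v1 := vset v c.1 c.2
        if cellAt land c.1 c.2 = 0 then
          floodA land n m fuel rest v1 sz lo hi
        else
          floodA land n m fuel
            (rest ++ [(c.1, c.2 + 1), (c.1, c.2 - 1), (c.1 + 1, c.2), (c.1 - 1, c.2)])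
            v1 (sz + 1) (min lo c.1) (max hi c.1)

-- one body of A's outer double loop, at cell (x, y); state = (visited, oil)
def cellStepA (land : List (List Int)) (n m : Int) (fuel : Nat)
    (st : List (List Bool) × List Int) (x y : Int) : List (List Bool) × List Int :=
  if vget st.1 x y then st
  else if cellAt land x y = 0 then (vset st.1 x y, st.2)
  else
    let r := floodA land n m fuel [(x, y)] st.1 0 x x
    (r.1, (PySem.List.pyRange r.2.2.1 (r.2.2.2 + 1) 1).foldl
            (fun arr i => arr.set i.toNat (arr.getD i.toNat 0 + r.2.1)) st.2)

def solution (land : List (List Int)) : Int :=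
  let n : Int := land.length
  let m : Int := (PySem.List.pyGetD land 0 []).length
  let visited0 : List (List Bool) :=
    (PySem.List.pyRange 0 n 1).map (fun _ => (PySem.List.pyRange 0 m 1).map (fun _ => false))
  let oil0 : List Int := List.replicate m.toNat 0
  let fuel := 4 * (n.toNat * m.toNat) + 1
  let r := (PySem.List.pyRange 0 n 1).foldl
    (fun st y => (PySem.List.pyRange 0 m 1).foldl (fun st x => cellStepA land n m fuel st x y) st)
    (visited0, oil0)
  (PySem.List.max? r.2 (fun z => z)).getD 0

-- ===== PORT B =====
-- the `while frontier:` loop of B (fuel only makes the recursion total; Python's loop terminates)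
def bfsB (land : List (List Int)) (n m : Int) :
    Nat → PySem.Set (Int × Int) → PySem.Set (Int × Int) → PySem.Set (Int × Int)
  | 0, _, comp => comp
  | fuel + 1, frontier, comp =>
    if frontier = [] then comp
    else
      let next := frontier.foldl
        (fun acc p =>
          [(p.1 - 1, p.2), (p.1 + 1, p.2), (p.1, p.2 - 1), (p.1, p.2 + 1)].foldl
            (fun acc q =>
              if 0 ≤ q.1 ∧ q.1 < m ∧ 0 ≤ q.2 ∧ q.2 < n ∧ cellAt land q.1 q.2 ≠ 0 ∧
                  ¬ PySem.Set.contains comp q then PySem.Set.add acc q else acc)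
            acc)
        PySem.Set.empty
      bfsB land n m fuel next (PySem.Set.update comp next)

-- one body of B's outer double loop, at cell (x, y); state = (done, comps)
def cellStepB (land : List (List Int)) (n m : Int) (fuel : Nat)
    (st : PySem.Set (Int × Int) × List (Int × Int × Int)) (x y : Int) :
    PySem.Set (Int × Int) × List (Int × Int × Int) :=
  if cellAt land x y = 0 ∨ PySem.Set.contains st.1 (x, y) then st
  else
    let comp := bfsB land n m fuel [(x, y)] [(x, y)]
    let xs := comp.map (fun c => c.1)
    (PySem.Set.update st.1 comp,
     st.2 ++ [((comp.length : Int), (PySem.List.min? xs (fun z => z)).getD 0,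
               (PySem.List.max? xs (fun z => z)).getD 0)])

def solution_alt (land : List (List Int)) : Int :=
  let n : Int := land.length
  let m : Int := (PySem.List.pyGetD land 0 []).length
  let fuel := n.toNat * m.toNat + 2
  let r := (PySem.List.pyRange 0 n 1).foldl
    (fun st y => (PySem.List.pyRange 0 m 1).foldl (fun st x => cellStepB land n m fuel st x y) st)
    (PySem.Set.empty, [])
  (PySem.List.max?
    ((PySem.List.pyRange 0 m 1).map
      (fun c => ((r.2.filter (fun t => t.2.1 ≤ c ∧ c ≤ t.2.2)).map (fun t => t.1)).sum))
    (fun z => z)).getD 0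

-- ===== PRECONDITION & SPEC =====
-- Pre_ excludes exactly the inputs where Python A raises: an empty grid (land[0] → IndexError),
-- a first row of length 0 (max(oil) on [] → ValueError), and a later row shorter than the first
-- (land[y][x] → IndexError); A returns normally on everything else.
def Pre_solution (land : List (List Int)) : Prop :=
  land ≠ [] ∧ (PySem.List.pyGetD land 0 []).length ≠ 0 ∧
    ∀ r ∈ land, (PySem.List.pyGetD land 0 []).length ≤ r.length
instance (land : List (List Int)) : Decidable (Pre_solution land) := by
  unfold Pre_solution; infer_instance
def pvWitness_solution : List (List Int) := [[1, 0], [1, 1]]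
def Spec_solution (land : List (List Int)) (out : Int) : Prop := out = solution_alt land
instance (land : List (List Int)) (out : Int) : Decidable (Spec_solution land out) := by
  unfold Spec_solution; infer_instance

-- ===== CLAIM (what is proved, stated in full; the proofs are below) =====
def Claim_equal_solution : Prop :=
  ∀ (land : List (List Int)), Dom_solution land → Pre_solution land →
    Spec_solution land (solution land)

-- ===== LEMMAS AND PROOFS =====

-- ---------- M0: basic geometry, grid and counting infrastructure ----------

def inb (n m : Int) (c : Int × Int) : Prop := 0 ≤ c.1 ∧ c.1 < m ∧ 0 ≤ c.2 ∧ c.2 < n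

def oilb (land : List (List Int)) (n m : Int) (c : Int × Int) : Prop :=
  inb n m c ∧ cellAt land c.1 c.2 ≠ 0

def adj (land : List (List Int)) (n m : Int) (c d : Int × Int) : Prop :=
  oilb land n m c ∧ oilb land n m d ∧
    ((d.1 = c.1 + 1 ∧ d.2 = c.2) ∨ (d.1 = c.1 - 1 ∧ d.2 = c.2) ∨
     (d.1 = c.1 ∧ d.2 = c.2 + 1) ∨ (d.1 = c.1 ∧ d.2 = c.2 - 1))

def Reach (land : List (List Int)) (n m : Int) (s c : Int × Int) : Prop :=
  Relation.ReflTransGen (adj land n m) s c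

lemma adj_symm (land : List (List Int)) (n m : Int) : Symmetric (adj land n m) := by
  rintro c d ⟨hc, hd, h⟩
  exact ⟨hd, hc, by omega⟩

lemma reach_oilb {land : List (List Int)} {n m : Int} {s c : Int × Int}
    (hs : oilb land n m s) (h : Reach land n m s c) : oilb land n m c := by
  induction h with
  | refl => exact hs
  | tail _ h2 _ => exact h2.2.1

def cells (n m : Int) : List (Int × Int) :=
  (PySem.List.pyRange 0 m 1) ×ˢ (PySem.List.pyRange 0 n 1)

lemma mem_cells {n m : Int} {c : Int × Int} : c ∈ cells n m ↔ inb n m c := by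
  obtain ⟨x, y⟩ := c
  simp [cells, inb, PySem.List.mem_pyRange_one]
  omega

lemma nodup_cells (n m : Int) : (cells n m).Nodup :=
  List.Nodup.product (PySem.List.nodup_pyRange_one 0 m) (PySem.List.nodup_pyRange_one 0 n)

lemma length_cells (n m : Int) : (cells n m).length = m.toNat * n.toNat := by
  simp [cells, List.length_product, PySem.List.length_pyRange_one]

-- count over a Nodup list when exactly one element flips from satisfying p to not satisfying q
lemma countP_flip {α : Type} {l : List α} (hl : l.Nodup) {p q : α → Bool} {e : α}
    (he : e ∈ l) (hpe : p e = true) (hqe : q e = false)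
    (hag : ∀ x ∈ l, x ≠ e → q x = p x) : l.countP q + 1 = l.countP p := by
  obtain ⟨l₁, l₂, rfl⟩ := List.append_of_mem he
  have hnd := hl
  rw [List.nodup_append] at hnd
  have h1 : l₁.countP q = l₁.countP p := by
    apply List.countP_congr
    intro x hx
    have hxe : x ≠ e := hnd.2.2 x hx e (by simp)
    rw [hag x (by simp [hx]) hxe]
  have h2 : l₂.countP q = l₂.countP p := by
    apply List.countP_congr
    intro x hx
    have hxe : x ≠ e := by
      intro h; subst h
      exact (List.nodup_cons.mp hnd.2.1).1 hx
    rw [hag x (by simp [hx]) hxe]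
  simp [List.countP_append, hpe, hqe, h1, h2]
  omega

def Dims (n m : Int) (v : List (List Bool)) : Prop :=
  v.length = n.toNat ∧ ∀ r ∈ v, r.length = m.toNat

def unvis (n m : Int) (v : List (List Bool)) : Nat :=
  (cells n m).countP (fun c => ! vget v c.1 c.2)

def noc (land : List (List Int)) (n m : Int) (v : List (List Bool)) : Nat :=
  (cells n m).countP (fun c => decide (cellAt land c.1 c.2 ≠ 0) && ! vget v c.1 c.2)

lemma getD_set_gen {α : Type} (l : List α) (k i : Nat) (c d : α) :
    (l.set k c).getD i d = if k = i ∧ k < l.length then c else l.getD i d := by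
  rw [List.getD_eq_getElem?_getD, List.getElem?_set]
  by_cases h : k = i
  · subst h
    by_cases h2 : k < l.length <;> simp [h2, List.getD_eq_getElem?_getD]
  · simp [h, List.getD_eq_getElem?_getD]

lemma dims_vset {n m : Int} {v : List (List Bool)} (h : Dims n m v) (x y : Int) :
    Dims n m (vset v x y) := by
  obtain ⟨h1, h2⟩ := h
  by_cases hy : y.toNat < v.length
  · refine ⟨by simp [vset, h1], ?_⟩
    intro r hr
    rcases List.mem_or_eq_of_mem_set hr with h | h
    · exact h2 r h
    · subst h
      rw [List.getD_eq_getElem _ _ hy, List.length_set]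
      exact h2 _ (List.getElem_mem _)
  · unfold vset
    rw [List.set_eq_of_length_le (by omega)]
    exact ⟨h1, h2⟩

lemma vget_mono_vset {v : List (List Bool)} {x y a b : Int}
    (h : vget v a b = true) : vget (vset v x y) a b = true := by
  unfold vget vset at *
  rw [getD_set_gen]
  split
  · next hc =>
    rw [getD_set_gen]
    split
    · rfl
    · rw [hc.1]
      exact h
  · exact h

lemma vget_vset {n m : Int} {v : List (List Bool)} (hD : Dims n m v) {x y a b : Int}
    (hxy : inb n m (x, y)) (hab : inb n m (a, b)) :
    vget (vset v x y) a b = if a = x ∧ b = y then true else vget v a b := by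
  obtain ⟨hxy1, hxy2, hxy3, hxy4⟩ := hxy
  obtain ⟨hab1, hab2, hab3, hab4⟩ := hab
  obtain ⟨hv1, hv2⟩ := hD
  have hylen : y.toNat < v.length := by omega
  have hrowlen : (v.getD y.toNat []).length = m.toNat := by
    rw [List.getD_eq_getElem _ _ hylen]
    exact hv2 _ (List.getElem_mem _)
  unfold vget vset
  rw [getD_set_gen]
  by_cases hb : b = y
  · subst hb
    rw [if_pos ⟨rfl, hylen⟩, getD_set_gen]
    by_cases ha : a = x
    · subst ha
      rw [if_pos ⟨rfl, by omega⟩, if_pos ⟨rfl, rfl⟩]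
    · rw [if_neg (by omega), if_neg (by tauto)]
  · rw [if_neg (by omega), if_neg (by tauto)]

-- ---------- M1: counting corollaries and floodA step equations ----------

lemma ne_cell_iff {x y : Int} {c : Int × Int} : c ≠ (x, y) ↔ ¬(c.1 = x ∧ c.2 = y) := by
  obtain ⟨a, b⟩ := c
  simp [Prod.ext_iff]

lemma unvis_vset {n m : Int} {v : List (List Bool)} (hD : Dims n m v) {x y : Int}
    (hin : inb n m (x, y)) (hun : vget v x y = false) :
    unvis n m (vset v x y) + 1 = unvis n m v := by
  apply countP_flip (nodup_cells n m) (mem_cells.mpr hin) (p := fun c => ! vget v c.1 c.2)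
  · simp [hun]
  · simp [vget_vset hD hin hin]
  · intro c hc hne
    show (! vget (vset v x y) c.1 c.2) = (! vget v c.1 c.2)
    rw [vget_vset hD hin (mem_cells.mp hc), if_neg (ne_cell_iff.mp hne)]

lemma noc_vset_oil {land : List (List Int)} {n m : Int} {v : List (List Bool)} (hD : Dims n m v)
    {x y : Int} (hin : inb n m (x, y)) (hun : vget v x y = false)
    (hoil : cellAt land x y ≠ 0) :
    noc land n m (vset v x y) + 1 = noc land n m v := by
  apply countP_flip (nodup_cells n m) (mem_cells.mpr hin)
    (p := fun c => decide (cellAt land c.1 c.2 ≠ 0) && ! vget v c.1 c.2)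
  · simp [hun, hoil]
  · simp [vget_vset hD hin hin]
  · intro c hc hne
    show (decide (cellAt land c.1 c.2 ≠ 0) && ! vget (vset v x y) c.1 c.2) =
      (decide (cellAt land c.1 c.2 ≠ 0) && ! vget v c.1 c.2)
    rw [vget_vset hD hin (mem_cells.mp hc), if_neg (ne_cell_iff.mp hne)]

lemma noc_vset_water {land : List (List Int)} {n m : Int} {v : List (List Bool)} (hD : Dims n m v)
    {x y : Int} (hin : inb n m (x, y)) (hwater : cellAt land x y = 0) :
    noc land n m (vset v x y) = noc land n m v := by
  apply List.countP_congr
  intro c hc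
  show (decide (cellAt land c.1 c.2 ≠ 0) && ! vget (vset v x y) c.1 c.2) = true ↔
    (decide (cellAt land c.1 c.2 ≠ 0) && ! vget v c.1 c.2) = true
  rw [vget_vset hD hin (mem_cells.mp hc)]
  by_cases h : c.1 = x ∧ c.2 = y
  · have hc0 : cellAt land c.1 c.2 = 0 := by rw [h.1, h.2]; exact hwater
    simp [hc0]
  · rw [if_neg h]

lemma floodA_nil (land : List (List Int)) (n m : Int) (fuel : Nat) (v : List (List Bool))
    (sz lo hi : Int) : floodA land n m fuel [] v sz lo hi = (v, sz, lo, hi) := by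
  cases fuel <;> rfl

lemma floodA_snoc_skip {land : List (List Int)} {n m : Int} {fuel : Nat}
    {rest : List (Int × Int)} {c : Int × Int} {v : List (List Bool)} {sz lo hi : Int}
    (h : ¬(0 ≤ c.1 ∧ c.1 < m) ∨ ¬(0 ≤ c.2 ∧ c.2 < n) ∨ vget v c.1 c.2) :
    floodA land n m (fuel + 1) (rest ++ [c]) v sz lo hi =
      floodA land n m fuel rest v sz lo hi := by
  rw [floodA, PySem.List.pop?_last]
  dsimp only
  rw [if_pos h]

lemma floodA_snoc_water {land : List (List Int)} {n m : Int} {fuel : Nat}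
    {rest : List (Int × Int)} {c : Int × Int} {v : List (List Bool)} {sz lo hi : Int}
    (hin : inb n m c) (hv : vget v c.1 c.2 = false) (hw : cellAt land c.1 c.2 = 0) :
    floodA land n m (fuel + 1) (rest ++ [c]) v sz lo hi =
      floodA land n m fuel rest (vset v c.1 c.2) sz lo hi := by
  obtain ⟨h1, h2, h3, h4⟩ := hin
  rw [floodA, PySem.List.pop?_last]
  dsimp only
  rw [if_neg (by push Not; exact ⟨⟨h1, h2⟩, ⟨h3, h4⟩, by simp [hv]⟩), if_pos hw]

lemma floodA_snoc_oil {land : List (List Int)} {n m : Int} {fuel : Nat}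
    {rest : List (Int × Int)} {c : Int × Int} {v : List (List Bool)} {sz lo hi : Int}
    (hin : inb n m c) (hv : vget v c.1 c.2 = false) (hw : cellAt land c.1 c.2 ≠ 0) :
    floodA land n m (fuel + 1) (rest ++ [c]) v sz lo hi =
      floodA land n m fuel
        (rest ++ [(c.1, c.2 + 1), (c.1, c.2 - 1), (c.1 + 1, c.2), (c.1 - 1, c.2)])
        (vset v c.1 c.2) (sz + 1) (min lo c.1) (max hi c.1) := by
  obtain ⟨h1, h2, h3, h4⟩ := hin
  rw [floodA, PySem.List.pop?_last]
  dsimp only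
  rw [if_neg (by push Not; exact ⟨⟨h1, h2⟩, ⟨h3, h4⟩, by simp [hv]⟩), if_neg hw]

-- ---------- M2: the DFS worklist invariant ----------

-- postcondition of A's stack loop: monotone marking, every in-bounds stack cell ends marked,
-- newly marked oil cells are closed under adjacency and lie in S, size counts newly marked oil
-- cells, lo/hi are the min/max column over {lo/hi} ∪ newly marked oil cells
def FloodPost (land : List (List Int)) (n m : Int) (S : Int × Int → Prop)
    (stack : List (Int × Int)) (v : List (List Bool)) (sz lo hi : Int)
    (r : List (List Bool) × Int × Int × Int) : Prop :=
  Dims n m r.1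
  ∧ (∀ a b : Int, vget v a b = true → vget r.1 a b = true)
  ∧ (∀ c ∈ stack, inb n m c → vget r.1 c.1 c.2 = true)
  ∧ (∀ c : Int × Int, oilb land n m c → vget r.1 c.1 c.2 = true → vget v c.1 c.2 = false →
      ∀ d, adj land n m c d → vget r.1 d.1 d.2 = true)
  ∧ (∀ c : Int × Int, oilb land n m c → vget r.1 c.1 c.2 = true →
      vget v c.1 c.2 = true ∨ S c)
  ∧ (r.2.1 = sz + (noc land n m v : Int) - (noc land n m r.1 : Int))
  ∧ (r.2.2.1 ≤ lo)
  ∧ (r.2.2.1 = lo ∨ ∃ c : Int × Int, oilb land n m c ∧ vget v c.1 c.2 = false ∧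
      vget r.1 c.1 c.2 = true ∧ c.1 = r.2.2.1)
  ∧ (∀ c : Int × Int, oilb land n m c → vget v c.1 c.2 = false → vget r.1 c.1 c.2 = true →
      r.2.2.1 ≤ c.1)
  ∧ (hi ≤ r.2.2.2)
  ∧ (r.2.2.2 = hi ∨ ∃ c : Int × Int, oilb land n m c ∧ vget v c.1 c.2 = false ∧
      vget r.1 c.1 c.2 = true ∧ c.1 = r.2.2.2)
  ∧ (∀ c : Int × Int, oilb land n m c → vget v c.1 c.2 = false → vget r.1 c.1 c.2 = true →
      c.1 ≤ r.2.2.2)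

lemma flood_post_base {land : List (List Int)} {n m : Int} {S : Int × Int → Prop}
    {v : List (List Bool)} {sz lo hi : Int} (hD : Dims n m v) :
    FloodPost land n m S [] v sz lo hi (v, sz, lo, hi) := by
  refine ⟨hD, fun a b h => h, by simp, ?_, fun c _ h => Or.inl h, by ring, le_refl _,
    Or.inl rfl, ?_, le_refl _, Or.inl rfl, ?_⟩
  · intro c _ h1 h2 _ _
    rw [h1] at h2
    exact absurd h2 (by simp)
  · intro c _ h2 h1
    rw [h1] at h2
    exact absurd h2 (by simp)
  · intro c _ h2 h1
    rw [h1] at h2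
    exact absurd h2 (by simp)

theorem flood_main (land : List (List Int)) (n m : Int) (S : Int × Int → Prop)
    (hSadj : ∀ c d, S c → adj land n m c d → S d) :
    ∀ (fuel : Nat) (stack : List (Int × Int)) (v : List (List Bool)) (sz lo hi : Int),
    Dims n m v →
    4 * unvis n m v + stack.length ≤ fuel →
    (∀ c ∈ stack, oilb land n m c → S c) →
    FloodPost land n m S stack v sz lo hi (floodA land n m fuel stack v sz lo hi) := by
  intro fuel
  induction fuel with
  | zero =>
    intro stack v sz lo hi hD hfuel _
    have hs : stack = [] := List.eq_nil_of_length_eq_zero (by omega)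
    subst hs
    rw [floodA_nil]
    exact flood_post_base hD
  | succ fuel IH =>
    intro stack v sz lo hi hD hfuel hstack
    rcases List.eq_nil_or_concat' stack with rfl | ⟨rest, c, rfl⟩
    · rw [floodA_nil]
      exact flood_post_base hD
    · have hlen : (rest ++ [c]).length = rest.length + 1 := by simp
      by_cases hskip : ¬(0 ≤ c.1 ∧ c.1 < m) ∨ ¬(0 ≤ c.2 ∧ c.2 < n) ∨ vget v c.1 c.2 = true
      · -- popped cell is out of bounds or already visited: plain recursion on rest
        rw [floodA_snoc_skip hskip]
        have post := IH rest v sz lo hi hD (by omega)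
          (fun d hd hod => hstack d (by simp [hd]) hod)
        obtain ⟨p1, p2, p3, p4⟩ := post
        refine ⟨p1, p2, ?_, p4⟩
        intro d hd hind
        rcases List.mem_append.mp hd with hd | hd
        · exact p3 d hd hind
        · have hdc : d = c := by simpa using hd
          subst hdc
          rcases hskip with h | h | h
          · exact absurd ⟨hind.1, hind.2.1⟩ h
          · exact absurd ⟨hind.2.2.1, hind.2.2.2⟩ h
          · exact p2 d.1 d.2 h
      · -- popped cell is in bounds and unvisited
        push Not at hskip
        obtain ⟨hbx, hby, hnv⟩ := hskip
        have hin : inb n m c := ⟨hbx.1, hbx.2, hby.1, hby.2⟩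
        have hv : vget v c.1 c.2 = false := by simpa using hnv
        have hD1 : Dims n m (vset v c.1 c.2) := dims_vset hD c.1 c.2
        have hvc1 : vget (vset v c.1 c.2) c.1 c.2 = true := by
          rw [vget_vset hD hin hin]
          simp
        have hvne : ∀ c' : Int × Int, inb n m c' → ¬(c'.1 = c.1 ∧ c'.2 = c.2) →
            vget (vset v c.1 c.2) c'.1 c'.2 = vget v c'.1 c'.2 := by
          intro c' hin' hne
          rw [vget_vset hD hin hin', if_neg hne]
        by_cases hw : cellAt land c.1 c.2 = 0
        · -- water cell: mark it and recurse on rest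
          rw [floodA_snoc_water hin hv hw]
          have hu : unvis n m (vset v c.1 c.2) + 1 = unvis n m v := unvis_vset hD hin hv
          have post := IH rest (vset v c.1 c.2) sz lo hi hD1 (by omega)
            (fun d hd hod => hstack d (by simp [hd]) hod)
          obtain ⟨p1, p2, p3, p4, p5, p6, p7, p8, p9, p10, p11, p12⟩ := post
          have hmono : ∀ a b : Int, vget v a b = true →
              vget (floodA land n m fuel rest (vset v c.1 c.2) sz lo hi).1 a b = true :=
            fun a b h => p2 a b (vget_mono_vset h)
          have hnoteq : ∀ c' : Int × Int, oilb land n m c' → ¬(c'.1 = c.1 ∧ c'.2 = c.2) := by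
            intro c' ho' hcc
            apply ho'.2
            rw [hcc.1, hcc.2]
            exact hw
          have hsame : ∀ c' : Int × Int, oilb land n m c' →
              vget (vset v c.1 c.2) c'.1 c'.2 = vget v c'.1 c'.2 :=
            fun c' ho' => hvne c' ho'.1 (hnoteq c' ho')
          refine ⟨p1, hmono, ?_, ?_, ?_, ?_, p7, ?_, ?_, p10, ?_, ?_⟩
          · intro d hd hind
            rcases List.mem_append.mp hd with hd | hd
            · exact p3 d hd hind
            · have hdc : d = c := by simpa using hd
              subst hdc
              exact p2 d.1 d.2 hvc1
          · intro c' ho' hr' hv' d hadj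
            exact p4 c' ho' hr' (by rw [hsame c' ho']; exact hv') d hadj
          · intro c' ho' hr'
            rcases p5 c' ho' hr' with h | h
            · rw [hsame c' ho'] at h
              exact Or.inl h
            · exact Or.inr h
          · rw [p6, noc_vset_water hD hin hw]
          · rcases p8 with h | h
            · exact Or.inl h
            · obtain ⟨c', h1, h2, h3, h4⟩ := h
              exact Or.inr ⟨c', h1, by rw [← hsame c' h1]; exact h2, h3, h4⟩
          · intro c' ho' hv' hr'
            exact p9 c' ho' (by rw [hsame c' ho']; exact hv') hr'
          · rcases p11 with h | h
            · exact Or.inl h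
            · obtain ⟨c', h1, h2, h3, h4⟩ := h
              exact Or.inr ⟨c', h1, by rw [← hsame c' h1]; exact h2, h3, h4⟩
          · intro c' ho' hv' hr'
            exact p12 c' ho' (by rw [hsame c' ho']; exact hv') hr'
        · -- oil cell: mark, count, extend range, push the four neighbours
          rw [floodA_snoc_oil hin hv hw]
          have hoc : oilb land n m c := ⟨hin, hw⟩
          have hSc : S c := hstack c (by simp) hoc
          have hu : unvis n m (vset v c.1 c.2) + 1 = unvis n m v := unvis_vset hD hin hv
          set nbrs : List (Int × Int) :=
            [(c.1, c.2 + 1), (c.1, c.2 - 1), (c.1 + 1, c.2), (c.1 - 1, c.2)] with hnbrs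
          have hadj_nbr : ∀ d ∈ nbrs, oilb land n m d → adj land n m c d := by
            intro d hd hod
            have : d = (c.1, c.2 + 1) ∨ d = (c.1, c.2 - 1) ∨ d = (c.1 + 1, c.2) ∨
                d = (c.1 - 1, c.2) := by simpa [hnbrs] using hd
            rcases this with rfl | rfl | rfl | rfl
            · exact ⟨hoc, hod, by simp⟩
            · exact ⟨hoc, hod, by simp⟩
            · exact ⟨hoc, hod, by simp⟩
            · exact ⟨hoc, hod, by simp⟩
          have post := IH (rest ++ nbrs) (vset v c.1 c.2) (sz + 1) (min lo c.1) (max hi c.1)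
            hD1 (by simp [hnbrs]; omega) ?hstk
          case hstk =>
            intro d hd hod
            rcases List.mem_append.mp hd with hd | hd
            · exact hstack d (by simp [hd]) hod
            · exact hSadj c d hSc (hadj_nbr d hd hod)
          obtain ⟨p1, p2, p3, p4, p5, p6, p7, p8, p9, p10, p11, p12⟩ := post
          set r := floodA land n m fuel (rest ++ nbrs) (vset v c.1 c.2) (sz + 1)
            (min lo c.1) (max hi c.1) with hr
          have hmono : ∀ a b : Int, vget v a b = true → vget r.1 a b = true :=
            fun a b h => p2 a b (vget_mono_vset h)
          have hrc : vget r.1 c.1 c.2 = true := p2 c.1 c.2 hvc1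
          have hveq : ∀ c' : Int × Int, inb n m c' → ¬(c'.1 = c.1 ∧ c'.2 = c.2) →
              vget (vset v c.1 c.2) c'.1 c'.2 = vget v c'.1 c'.2 := hvne
          refine ⟨p1, hmono, ?_, ?_, ?_, ?_, ?_, ?_, ?_, ?_, ?_, ?_⟩
          · intro d hd hind
            rcases List.mem_append.mp hd with hd | hd
            · exact p3 d (by simp [hd]) hind
            · have hdc : d = c := by simpa using hd
              subst hdc
              exact hrc
          · -- closure: every newly marked oil cell has its adjacent cells marked
            intro c' ho' hr' hv' d hadj
            by_cases hcc : c'.1 = c.1 ∧ c'.2 = c.2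
            · -- c' is the popped cell: d is one of the pushed neighbours
              have hd4 : d = (c.1, c.2 + 1) ∨ d = (c.1, c.2 - 1) ∨ d = (c.1 + 1, c.2) ∨
                  d = (c.1 - 1, c.2) := by
                obtain ⟨_, _, hoff⟩ := hadj
                rcases hoff with ⟨h1, h2⟩ | ⟨h1, h2⟩ | ⟨h1, h2⟩ | ⟨h1, h2⟩
                · exact Or.inr (Or.inr (Or.inl (by rw [← Prod.mk.eta (p := d), h1, h2, hcc.1, hcc.2])))
                · exact Or.inr (Or.inr (Or.inr (by rw [← Prod.mk.eta (p := d), h1, h2, hcc.1, hcc.2])))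
                · exact Or.inl (by rw [← Prod.mk.eta (p := d), h1, h2, hcc.1, hcc.2])
                · exact Or.inr (Or.inl (by rw [← Prod.mk.eta (p := d), h1, h2, hcc.1, hcc.2]))
              have hdin : inb n m d := hadj.2.1.1
              have : d ∈ rest ++ nbrs := by
                rcases hd4 with rfl | rfl | rfl | rfl <;> simp [hnbrs]
              exact p3 d this hdin
            · exact p4 c' ho' hr' (by rw [hveq c' ho'.1 hcc]; exact hv') d hadj
          · -- soundness: every newly marked oil cell lies in S
            intro c' ho' hr'
            by_cases hcc : c'.1 = c.1 ∧ c'.2 = c.2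
            · have : c' = c := by
                rw [← Prod.mk.eta (p := c'), hcc.1, hcc.2]
              exact Or.inr (this ▸ hSc)
            · rcases p5 c' ho' hr' with h | h
              · rw [hveq c' ho'.1 hcc] at h
                exact Or.inl h
              · exact Or.inr h
          · rw [p6]
            have := noc_vset_oil hD hin hv hw
            omega
          · exact le_trans p7 (min_le_left _ _)
          · rcases p8 with h | h
            · rcases min_cases lo c.1 with ⟨hm, _⟩ | ⟨hm, hlt⟩
              · exact Or.inl (by rw [h, hm])
              · exact Or.inr ⟨c, hoc, hv, hrc, by rw [h, hm]⟩
            · obtain ⟨c', h1, h2, h3, h4⟩ := h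
              by_cases hcc : c'.1 = c.1 ∧ c'.2 = c.2
              · exact Or.inr ⟨c, hoc, hv, hrc, by rw [← hcc.1, h4]⟩
              · exact Or.inr ⟨c', h1, by rw [← hveq c' h1.1 hcc]; exact h2, h3, h4⟩
          · intro c' ho' hv' hr'
            by_cases hcc : c'.1 = c.1 ∧ c'.2 = c.2
            · calc r.2.2.1 ≤ min lo c.1 := p7
                _ ≤ c.1 := min_le_right _ _
                _ = c'.1 := hcc.1.symm
            · exact p9 c' ho' (by rw [hveq c' ho'.1 hcc]; exact hv') hr'
          · exact le_trans (le_max_left _ _) p10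
          · rcases p11 with h | h
            · rcases max_cases hi c.1 with ⟨hm, _⟩ | ⟨hm, hlt⟩
              · exact Or.inl (by rw [h, hm])
              · exact Or.inr ⟨c, hoc, hv, hrc, by rw [h, hm]⟩
            · obtain ⟨c', h1, h2, h3, h4⟩ := h
              by_cases hcc : c'.1 = c.1 ∧ c'.2 = c.2
              · exact Or.inr ⟨c, hoc, hv, hrc, by rw [← hcc.1, h4]⟩
              · exact Or.inr ⟨c', h1, by rw [← hveq c' h1.1 hcc]; exact h2, h3, h4⟩
          · intro c' ho' hv' hr'
            by_cases hcc : c'.1 = c.1 ∧ c'.2 = c.2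
            · calc c'.1 = c.1 := hcc.1
                _ ≤ max hi c.1 := le_max_right _ _
                _ ≤ r.2.2.2 := p10
            · exact p12 c' ho' (by rw [hveq c' ho'.1 hcc]; exact hv') hr'

-- ---------- M3: flooding from a fresh seed computes exactly its component ----------

lemma countP_split {α : Type} (l : List α) (p q : α → Bool) :
    l.countP p = l.countP (fun x => p x && q x) + l.countP (fun x => p x && !q x) := by
  induction l with
  | nil => rfl
  | cons a t ih =>
    simp only [List.countP_cons, ih]
    cases hp : p a <;> cases hq : q a <;> simp <;> omega

-- the number of cells of the component of s (classical decidability is only used in specs)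
noncomputable def reachCount (land : List (List Int)) (n m : Int) (s : Int × Int) : Nat :=
  (cells n m).countP (fun c => @decide (Reach land n m s c) (Classical.propDecidable _))

theorem flood_seed (land : List (List Int)) (n m : Int) (s : Int × Int)
    (v : List (List Bool)) (hD : Dims n m v) (hos : oilb land n m s)
    (hdisj : ∀ c, Reach land n m s c → vget v c.1 c.2 = false)
    (fuel : Nat) (hfuel : 4 * unvis n m v + 1 ≤ fuel) :
    Dims n m (floodA land n m fuel [s] v 0 s.1 s.1).1
    ∧ (∀ c : Int × Int,
        oilb land n m c → (vget (floodA land n m fuel [s] v 0 s.1 s.1).1 c.1 c.2 = true ↔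
          vget v c.1 c.2 = true ∨ Reach land n m s c))
    ∧ (floodA land n m fuel [s] v 0 s.1 s.1).2.1 = (reachCount land n m s : Int)
    ∧ ((∃ c : Int × Int, Reach land n m s c ∧ c.1 = (floodA land n m fuel [s] v 0 s.1 s.1).2.2.1)
        ∧ ∀ c : Int × Int, Reach land n m s c → (floodA land n m fuel [s] v 0 s.1 s.1).2.2.1 ≤ c.1)
    ∧ ((∃ c : Int × Int, Reach land n m s c ∧ c.1 = (floodA land n m fuel [s] v 0 s.1 s.1).2.2.2)
        ∧ ∀ c : Int × Int, Reach land n m s c → c.1 ≤ (floodA land n m fuel [s] v 0 s.1 s.1).2.2.2) := by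
  have hSadj : ∀ c d, Reach land n m s c → adj land n m c d → Reach land n m s d :=
    fun c d hc hcd => Relation.ReflTransGen.tail hc hcd
  have post := flood_main land n m (Reach land n m s) hSadj fuel [s] v 0 s.1 s.1 hD
    (by simpa using hfuel) (by intro c hc _; rw [List.mem_singleton.mp hc]; exact .refl)
  obtain ⟨p1, p2, p3, p4, p5, p6, p7, p8, p9, p10, p11, p12⟩ := post
  set r := floodA land n m fuel [s] v 0 s.1 s.1 with hr
  -- every cell of the component ends marked
  have hmarked : ∀ c : Int × Int, Reach land n m s c → vget r.1 c.1 c.2 = true := by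
    intro c hc
    induction hc with
    | refl => exact p3 s (by simp) hos.1
    | tail hab hbc ih =>
      exact p4 _ hbc.1 ih (hdisj _ hab) _ hbc
  have hiff : ∀ c : Int × Int, oilb land n m c →
      (vget r.1 c.1 c.2 = true ↔ vget v c.1 c.2 = true ∨ Reach land n m s c) := by
    intro c hoc
    constructor
    · exact p5 c hoc
    · rintro (h | h)
      · exact p2 c.1 c.2 h
      · exact hmarked c h
  refine ⟨p1, hiff, ?_, ⟨?_, ?_⟩, ⟨?_, ?_⟩⟩
  · -- size = number of component cells
    have hsplit := countP_split (cells n m)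
      (fun c => decide (cellAt land c.1 c.2 ≠ 0) && ! vget v c.1 c.2)
      (fun c => @decide (Reach land n m s c) (Classical.propDecidable _))
    have h1 : (cells n m).countP
        (fun c => (decide (cellAt land c.1 c.2 ≠ 0) && ! vget v c.1 c.2) &&
          @decide (Reach land n m s c) (Classical.propDecidable _)) = reachCount land n m s := by
      apply List.countP_congr
      intro c hc
      simp only [Bool.and_eq_true, Bool.not_eq_true', decide_eq_true_eq]
      constructor
      · exact fun h => h.2
      · intro h
        exact ⟨⟨(reach_oilb hos h).2, hdisj c h⟩, h⟩
    have h2 : (cells n m).countP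
        (fun c => (decide (cellAt land c.1 c.2 ≠ 0) && ! vget v c.1 c.2) &&
          ! @decide (Reach land n m s c) (Classical.propDecidable _)) = noc land n m r.1 := by
      apply List.countP_congr
      intro c hc
      simp only [Bool.and_eq_true, Bool.not_eq_true', decide_eq_true_eq]
      constructor
      · rintro ⟨⟨ho, hv⟩, hnr⟩
        refine ⟨ho, ?_⟩
        rw [decide_eq_false_iff_not] at hnr
        cases hvr : vget r.1 c.1 c.2
        · rfl
        · rcases (hiff c ⟨mem_cells.mp hc, ho⟩).mp hvr with h | h
          · rw [h] at hv
            simp at hv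
          · exact absurd h hnr
      · rintro ⟨ho, hvr⟩
        have hoc : oilb land n m c := ⟨mem_cells.mp hc, ho⟩
        have hnv : vget v c.1 c.2 = false := by
          cases hv : vget v c.1 c.2
          · rfl
          · rw [p2 c.1 c.2 hv] at hvr
            simp at hvr
        refine ⟨⟨ho, hnv⟩, ?_⟩
        rw [decide_eq_false_iff_not]
        intro hreach
        rw [hmarked c hreach] at hvr
        simp at hvr
    rw [p6]
    beta_reduce at hsplit
    rw [h1, h2] at hsplit
    unfold noc at hsplit ⊢
    omega
  · -- the final lo is attained by a component cell
    rcases p8 with h | h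
    · exact ⟨s, .refl, h.symm⟩
    · obtain ⟨c, h1, h2, h3, h4⟩ := h
      rcases (hiff c h1).mp h3 with h | h
      · rw [h] at h2
        simp at h2
      · exact ⟨c, h, h4⟩
  · -- and bounds the component columns from below
    intro c hc
    exact p9 c (reach_oilb hos hc) (hdisj c hc) (hmarked c hc)
  · rcases p11 with h | h
    · exact ⟨s, .refl, h.symm⟩
    · obtain ⟨c, h1, h2, h3, h4⟩ := h
      rcases (hiff c h1).mp h3 with h | h
      · rw [h] at h2
        simp at h2
      · exact ⟨c, h, h4⟩
  · intro c hc
    exact p12 c (reach_oilb hos hc) (hdisj c hc) (hmarked c hc)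

-- ---------- M4: B's frontier BFS computes exactly the component ----------

def nbrsOf (p : Int × Int) : List (Int × Int) :=
  [(p.1 - 1, p.2), (p.1 + 1, p.2), (p.1, p.2 - 1), (p.1, p.2 + 1)]

def nextSet (land : List (List Int)) (n m : Int)
    (comp frontier : PySem.Set (Int × Int)) : PySem.Set (Int × Int) :=
  frontier.foldl
    (fun acc p =>
      [(p.1 - 1, p.2), (p.1 + 1, p.2), (p.1, p.2 - 1), (p.1, p.2 + 1)].foldl
        (fun acc q =>
          if 0 ≤ q.1 ∧ q.1 < m ∧ 0 ≤ q.2 ∧ q.2 < n ∧ cellAt land q.1 q.2 ≠ 0 ∧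
              ¬ PySem.Set.contains comp q then PySem.Set.add acc q else acc)
        acc)
    PySem.Set.empty

lemma bfsB_nilFrontier (land : List (List Int)) (n m : Int) (fuel : Nat)
    (comp : PySem.Set (Int × Int)) : bfsB land n m fuel [] comp = comp := by
  cases fuel <;> simp [bfsB]

lemma bfsB_step {land : List (List Int)} {n m : Int} {fuel : Nat}
    {frontier comp : PySem.Set (Int × Int)} (h : frontier ≠ []) :
    bfsB land n m (fuel + 1) frontier comp =
      bfsB land n m fuel (nextSet land n m comp frontier)
        (comp.update (nextSet land n m comp frontier)) := by
  rw [bfsB]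
  dsimp only
  rw [if_neg h]
  rfl

lemma mem_foldl_addif {α : Type} [BEq α] [LawfulBEq α] (cond : α → Prop) [DecidablePred cond] :
    ∀ (l : List α) (acc : PySem.Set α) (y : α),
    (y ∈ l.foldl (fun a q => if cond q then PySem.Set.add a q else a) acc) ↔
      (y ∈ acc ∨ (y ∈ l ∧ cond y)) := by
  intro l
  induction l with
  | nil => simp
  | cons q t ih =>
    intro acc y
    rw [List.foldl_cons]
    by_cases hq : cond q
    · rw [if_pos hq, ih, PySem.Set.mem_add]
      constructor
      · rintro ((h | rfl) | ⟨ht, hc⟩)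
        · exact Or.inl h
        · exact Or.inr ⟨by simp, hq⟩
        · exact Or.inr ⟨by simp [ht], hc⟩
      · rintro (h | ⟨hm, hc⟩)
        · exact Or.inl (Or.inl h)
        · rcases List.mem_cons.mp hm with rfl | ht
          · exact Or.inl (Or.inr rfl)
          · exact Or.inr ⟨ht, hc⟩
    · rw [if_neg hq, ih]
      constructor
      · rintro (h | ⟨ht, hc⟩)
        · exact Or.inl h
        · exact Or.inr ⟨by simp [ht], hc⟩
      · rintro (h | ⟨hm, hc⟩)
        · exact Or.inl h
        · rcases List.mem_cons.mp hm with rfl | ht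
          · exact absurd hc hq
          · exact Or.inr ⟨ht, hc⟩

lemma nodup_foldl_addif {α : Type} [BEq α] [LawfulBEq α] (cond : α → Prop) [DecidablePred cond] :
    ∀ (l : List α) (acc : PySem.Set α), acc.Nodup →
    (l.foldl (fun a q => if cond q then PySem.Set.add a q else a) acc).Nodup := by
  intro l
  induction l with
  | nil => exact fun acc h => h
  | cons q t ih =>
    intro acc hacc
    rw [List.foldl_cons]
    by_cases hq : cond q
    · rw [if_pos hq]
      exact ih _ (PySem.Set.nodup_add _ _ hacc)
    · rw [if_neg hq]
      exact ih _ hacc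

lemma mem_nextSet {land : List (List Int)} {n m : Int}
    {comp frontier : PySem.Set (Int × Int)} {y : Int × Int} :
    y ∈ nextSet land n m comp frontier ↔
      ((∃ p ∈ frontier, y ∈ nbrsOf p) ∧
        (0 ≤ y.1 ∧ y.1 < m ∧ 0 ≤ y.2 ∧ y.2 < n ∧ cellAt land y.1 y.2 ≠ 0 ∧
          ¬ PySem.Set.contains comp y)) := by
  unfold nextSet
  have main : ∀ (l : List (Int × Int)) (acc : PySem.Set (Int × Int)),
      y ∈ l.foldl
        (fun acc p =>
          [(p.1 - 1, p.2), (p.1 + 1, p.2), (p.1, p.2 - 1), (p.1, p.2 + 1)].foldl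
            (fun acc q =>
              if 0 ≤ q.1 ∧ q.1 < m ∧ 0 ≤ q.2 ∧ q.2 < n ∧ cellAt land q.1 q.2 ≠ 0 ∧
                  ¬ PySem.Set.contains comp q then PySem.Set.add acc q else acc)
            acc)
        acc ↔
      (y ∈ acc ∨ ((∃ p ∈ l, y ∈ nbrsOf p) ∧
        (0 ≤ y.1 ∧ y.1 < m ∧ 0 ≤ y.2 ∧ y.2 < n ∧ cellAt land y.1 y.2 ≠ 0 ∧
          ¬ PySem.Set.contains comp y))) := by
    intro l
    induction l with
    | nil => simp
    | cons p t ih =>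
      intro acc
      rw [List.foldl_cons, ih,
        mem_foldl_addif (fun q => 0 ≤ q.1 ∧ q.1 < m ∧ 0 ≤ q.2 ∧ q.2 < n ∧
          cellAt land q.1 q.2 ≠ 0 ∧ ¬ PySem.Set.contains comp q)]
      unfold nbrsOf
      simp only [List.mem_cons]
      constructor
      · rintro ((h | ⟨hm, hc⟩) | ⟨⟨p', hp', hm⟩, hc⟩)
        · exact Or.inl h
        · exact Or.inr ⟨⟨p, Or.inl rfl, hm⟩, hc⟩
        · exact Or.inr ⟨⟨p', Or.inr hp', hm⟩, hc⟩
      · rintro (h | ⟨⟨p', hp', hm⟩, hc⟩)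
        · exact Or.inl (Or.inl h)
        · rcases hp' with rfl | hp'
          · exact Or.inl (Or.inr ⟨hm, hc⟩)
          · exact Or.inr ⟨⟨p', hp', hm⟩, hc⟩
  rw [main]
  simp

lemma nodup_nextSet (land : List (List Int)) (n m : Int)
    (comp frontier : PySem.Set (Int × Int)) : (nextSet land n m comp frontier).Nodup := by
  unfold nextSet
  have main : ∀ (l : List (Int × Int)) (acc : PySem.Set (Int × Int)), acc.Nodup →
      (l.foldl
        (fun acc p =>
          [(p.1 - 1, p.2), (p.1 + 1, p.2), (p.1, p.2 - 1), (p.1, p.2 + 1)].foldl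
            (fun acc q =>
              if 0 ≤ q.1 ∧ q.1 < m ∧ 0 ≤ q.2 ∧ q.2 < n ∧ cellAt land q.1 q.2 ≠ 0 ∧
                  ¬ PySem.Set.contains comp q then PySem.Set.add acc q else acc)
            acc)
        acc).Nodup := by
    intro l
    induction l with
    | nil => exact fun acc h => h
    | cons p t ih =>
      intro acc hacc
      rw [List.foldl_cons]
      exact ih _ (nodup_foldl_addif _ _ _ hacc)
  exact main frontier PySem.Set.empty List.nodup_nil

lemma adj_mem_nbrsOf {land : List (List Int)} {n m : Int} {c d : Int × Int}
    (h : adj land n m c d) : d ∈ nbrsOf c := by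
  obtain ⟨_, _, hoff⟩ := h
  unfold nbrsOf
  rcases hoff with ⟨h1, h2⟩ | ⟨h1, h2⟩ | ⟨h1, h2⟩ | ⟨h1, h2⟩ <;>
    [skip; skip; skip; skip] <;>
  · have : d = (d.1, d.2) := by simp
    rw [this, h1, h2]
    simp

lemma nbr_adj {land : List (List Int)} {n m : Int} {p d : Int × Int}
    (hp : oilb land n m p) (hd : oilb land n m d) (hmem : d ∈ nbrsOf p) :
    adj land n m p d := by
  have : d = (p.1 - 1, p.2) ∨ d = (p.1 + 1, p.2) ∨ d = (p.1, p.2 - 1) ∨ d = (p.1, p.2 + 1) := by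
    simpa [nbrsOf] using hmem
  rcases this with rfl | rfl | rfl | rfl
  · exact ⟨hp, hd, by simp⟩
  · exact ⟨hp, hd, by simp⟩
  · exact ⟨hp, hd, by simp⟩
  · exact ⟨hp, hd, by simp⟩

theorem bfs_main (land : List (List Int)) (n m : Int) (s : Int × Int)
    (hos : oilb land n m s) :
    ∀ (fuel : Nat) (frontier comp : PySem.Set (Int × Int)),
    comp.Nodup → s ∈ comp →
    (∀ c ∈ comp, Reach land n m s c) →
    (∀ c ∈ frontier, c ∈ comp) →
    (∀ c ∈ comp, c ∉ frontier → ∀ d, adj land n m c d → d ∈ comp) →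
    ((cells n m).length + 1 ≤ fuel + comp.length) →
    (bfsB land n m fuel frontier comp).Nodup ∧
      (∀ c, c ∈ bfsB land n m fuel frontier comp ↔ Reach land n m s c) := by
  intro fuel
  induction fuel with
  | zero =>
    intro frontier comp hnd _ hreach _ _ hbound
    have hsub : comp ⊆ cells n m := by
      intro c hc
      exact mem_cells.mpr (reach_oilb hos (hreach c hc)).1
    have := (List.subperm_of_subset hnd hsub).length_le
    omega
  | succ fuel IH =>
    intro frontier comp hnd hs hreach hfront hcl hbound
    by_cases hfr : frontier = []
    · subst hfr
      rw [bfsB_nilFrontier]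
      refine ⟨hnd, fun c => ⟨hreach c, ?_⟩⟩
      intro hc
      induction hc with
      | refl => exact hs
      | tail hab hbc ih => exact hcl _ ih (by simp) _ hbc
    · rw [bfsB_step hfr]
      set nxt := nextSet land n m comp frontier with hnxt
      have hnxt_not_comp : ∀ y ∈ nxt, y ∉ comp := by
        intro y hy
        have := (mem_nextSet.mp hy).2.2.2.2.2.2
        intro hmem
        exact this ((PySem.Set.contains_iff comp y).mpr hmem)
      have hnxt_reach : ∀ y ∈ nxt, Reach land n m s y := by
        intro y hy
        obtain ⟨⟨p, hp, hynb⟩, h1, h2, h3, h4, h5, _⟩ := mem_nextSet.mp hy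
        have hpr : Reach land n m s p := hreach p (hfront p hp)
        exact hpr.tail (nbr_adj (reach_oilb hos hpr) ⟨⟨h1, h2, h3, h4⟩, h5⟩ hynb)
      have hcl' : ∀ c ∈ comp, ∀ d, adj land n m c d → (d ∈ comp ∨ d ∈ nxt) := by
        intro c hc d hadj
        by_cases hdc : d ∈ comp
        · exact Or.inl hdc
        · by_cases hcf : c ∈ frontier
          · refine Or.inr (mem_nextSet.mpr ⟨⟨c, hcf, adj_mem_nbrsOf hadj⟩, ?_⟩)
            obtain ⟨hin, hcell⟩ := hadj.2.1
            refine ⟨hin.1, hin.2.1, hin.2.2.1, hin.2.2.2, hcell, ?_⟩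
            intro hcont
            exact hdc ((PySem.Set.contains_iff comp d).mp hcont)
          · exact Or.inl (hcl c hc hcf d hadj)
      by_cases hnn : nxt = []
      · rw [hnn, PySem.Set.update_nil, bfsB_nilFrontier]
        refine ⟨hnd, fun c => ⟨hreach c, ?_⟩⟩
        intro hc
        induction hc with
        | refl => exact hs
        | tail hab hbc ih =>
          rcases hcl' _ ih _ hbc with h | h
          · exact h
          · rw [hnn] at h
            simp at h
      · have hnxt_nd : nxt.Nodup := nodup_nextSet land n m comp frontier
        have hlen : (comp.update nxt).length = comp.length + nxt.length := by
          rw [PySem.Set.update_eq_append_of_disjoint comp nxt hnxt_nd hnxt_not_comp]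
          simp
        have hpos : 0 < nxt.length := List.length_pos_iff.mpr hnn
        refine IH nxt (comp.update nxt) (PySem.Set.nodup_update _ _ hnd)
          ((PySem.Set.mem_update _ _ _).mpr (Or.inl hs)) ?_ ?_ ?_ (by omega)
        · intro c hc
          rcases (PySem.Set.mem_update _ _ _).mp hc with h | h
          · exact hreach c h
          · exact hnxt_reach c h
        · intro c hc
          exact (PySem.Set.mem_update _ _ _).mpr (Or.inr hc)
        · intro c hc hcn d hadj
          rcases (PySem.Set.mem_update _ _ _).mp hc with h | h
          · rcases hcl' c h d hadj with hd | hd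
            · exact (PySem.Set.mem_update _ _ _).mpr (Or.inl hd)
            · exact (PySem.Set.mem_update _ _ _).mpr (Or.inr hd)
          · exact absurd h hcn

-- ---------- M5: the two per-component summaries coincide ----------

lemma nodup_length_eq_countP {α : Type} [DecidableEq α] {l base : List α}
    (hl : l.Nodup) (hb : base.Nodup) (hsub : ∀ x ∈ l, x ∈ base) :
    l.length = base.countP (fun x => decide (x ∈ l)) := by
  rw [List.countP_eq_length_filter]
  apply List.Perm.length_eq
  apply (List.perm_ext_iff_of_nodup hl (hb.filter _)).mpr
  intro a
  simp only [List.mem_filter, decide_eq_true_eq]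
  exact ⟨fun h => ⟨hsub a h, h⟩, fun h => h.2⟩

lemma comp_length_eq_reachCount {land : List (List Int)} {n m : Int} {s : Int × Int}
    (hos : oilb land n m s) {comp : List (Int × Int)} (hnd : comp.Nodup)
    (hmem : ∀ c, c ∈ comp ↔ Reach land n m s c) :
    (comp.length : Int) = (reachCount land n m s : Int) := by
  have h1 := nodup_length_eq_countP hnd (nodup_cells n m)
    (fun x hx => mem_cells.mpr (reach_oilb hos ((hmem x).mp hx)).1)
  have h2 : comp.length = reachCount land n m s := by
    rw [h1]
    apply List.countP_congr
    intro c _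
    simp only [decide_eq_true_eq]
    exact hmem c
  exact_mod_cast h2

lemma min_col_eq {land : List (List Int)} {n m : Int} {s : Int × Int}
    {comp : List (Int × Int)} (hmem : ∀ c, c ∈ comp ↔ Reach land n m s c)
    {loA : Int} (hwit : ∃ c : Int × Int, Reach land n m s c ∧ c.1 = loA)
    (hbound : ∀ c : Int × Int, Reach land n m s c → loA ≤ c.1) :
    (PySem.List.min? (comp.map (fun c => c.1)) (fun z => z)).getD 0 = loA := by
  obtain ⟨c0, hc0, hc0x⟩ := hwit
  have hc0m : c0.1 ∈ comp.map (fun c => c.1) :=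
    List.mem_map.mpr ⟨c0, (hmem c0).mpr hc0, rfl⟩
  cases hmin : PySem.List.min? (comp.map (fun c => c.1)) (fun z => z) with
  | none =>
    rw [PySem.List.min?_eq_none_iff] at hmin
    rw [hmin] at hc0m
    simp at hc0m
  | some μ =>
    have hμmem := PySem.List.min?_mem hmin
    obtain ⟨cμ, hcμ, hcμx⟩ := List.mem_map.mp hμmem
    have h1 : loA ≤ μ := by
      rw [← hcμx]
      exact hbound cμ ((hmem cμ).mp hcμ)
    have h2 : μ ≤ loA := by
      rw [← hc0x]
      exact PySem.List.min?_isMin hmin c0.1 hc0m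
    simp [le_antisymm h2 h1]

lemma max_col_eq {land : List (List Int)} {n m : Int} {s : Int × Int}
    {comp : List (Int × Int)} (hmem : ∀ c, c ∈ comp ↔ Reach land n m s c)
    {hiA : Int} (hwit : ∃ c : Int × Int, Reach land n m s c ∧ c.1 = hiA)
    (hbound : ∀ c : Int × Int, Reach land n m s c → c.1 ≤ hiA) :
    (PySem.List.max? (comp.map (fun c => c.1)) (fun z => z)).getD 0 = hiA := by
  obtain ⟨c0, hc0, hc0x⟩ := hwit
  have hc0m : c0.1 ∈ comp.map (fun c => c.1) :=
    List.mem_map.mpr ⟨c0, (hmem c0).mpr hc0, rfl⟩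
  cases hmax : PySem.List.max? (comp.map (fun c => c.1)) (fun z => z) with
  | none =>
    rw [PySem.List.max?_eq_none_iff] at hmax
    rw [hmax] at hc0m
    simp at hc0m
  | some μ =>
    have hμmem := PySem.List.max?_mem hmax
    obtain ⟨cμ, hcμ, hcμx⟩ := List.mem_map.mp hμmem
    have h1 : μ ≤ hiA := by
      rw [← hcμx]
      exact hbound cμ ((hmem cμ).mp hcμ)
    have h2 : hiA ≤ μ := by
      rw [← hc0x]
      exact PySem.List.max?_isMax hmax c0.1 hc0m
    simp [le_antisymm h1 h2]

-- ---------- M6: the outer-loop invariant ----------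

def covMap (m : Int) (comps : List (Int × Int × Int)) : List Int :=
  (PySem.List.pyRange 0 m 1).map
    (fun col => ((comps.filter (fun t => t.2.1 ≤ col ∧ col ≤ t.2.2)).map (fun t => t.1)).sum)

def OInv (land : List (List Int)) (n m : Int) (v : List (List Bool)) (oilArr : List Int)
    (done : PySem.Set (Int × Int)) (comps : List (Int × Int × Int)) : Prop :=
  Dims n m v
  ∧ done.Nodup
  ∧ (∀ c ∈ done, oilb land n m c)
  ∧ (∀ c ∈ done, ∀ d, adj land n m c d → d ∈ done)
  ∧ (∀ c : Int × Int, oilb land n m c → (vget v c.1 c.2 = true ↔ c ∈ done))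
  ∧ oilArr = covMap m comps

lemma rangeAdd_foldl (add : Int) :
    ∀ (k : Nat) (hi lo : Int) (arr : List Int), (hi + 1 - lo).toNat = k → 0 ≤ lo →
    hi < (arr.length : Int) →
    ((PySem.List.pyRange lo (hi + 1) 1).foldl
        (fun a i => a.set i.toNat (a.getD i.toNat 0 + add)) arr).length = arr.length ∧
    ∀ j : Nat, j < arr.length →
      ((PySem.List.pyRange lo (hi + 1) 1).foldl
          (fun a i => a.set i.toNat (a.getD i.toNat 0 + add)) arr).getD j 0 =
        arr.getD j 0 + (if lo ≤ (j : Int) ∧ (j : Int) ≤ hi then add else 0) := by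
  intro k
  induction k with
  | zero =>
    intro hi lo arr hk hlo hhi
    have hle : hi + 1 ≤ lo := by omega
    rw [PySem.List.pyRange_one_eq_nil hle]
    refine ⟨rfl, ?_⟩
    intro j hj
    rw [if_neg (by omega)]
    simp
  | succ k ih =>
    intro hi lo arr hk hlo hhi
    have hle : lo ≤ hi := by omega
    rw [PySem.List.pyRange_one_succ_right hle, List.foldl_append]
    have prev := ih (hi - 1) lo arr (by omega) hlo (by omega)
    rw [show hi - 1 + 1 = hi by ring] at prev
    obtain ⟨hplen, hpget⟩ := prev
    simp only [List.foldl_cons, List.foldl_nil]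
    set P := (PySem.List.pyRange lo hi 1).foldl
      (fun a i => a.set i.toNat (a.getD i.toNat 0 + add)) arr with hP
    have hPlen : P.length = arr.length := hplen
    have hhiN : hi.toNat < P.length := by
      rw [hPlen]
      omega
    refine ⟨by rw [List.length_set, hPlen], ?_⟩
    intro j hj
    rw [getD_set_gen]
    by_cases hji : hi.toNat = j
    · subst hji
      rw [if_pos ⟨rfl, hhiN⟩, hpget hi.toNat (by omega), if_neg (by omega), if_pos (by omega)]
      omega
    · rw [if_neg (by tauto), hpget j hj]
      by_cases hc : lo ≤ (j : Int) ∧ (j : Int) ≤ hi - 1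
      · rw [if_pos hc, if_pos (by omega)]
      · rw [if_neg hc, if_neg (by omega)]

lemma covMap_length (m : Int) (comps : List (Int × Int × Int)) :
    (covMap m comps).length = m.toNat := by
  simp [covMap, PySem.List.length_pyRange_one]

lemma covMap_getD (m : Int) (comps : List (Int × Int × Int)) (j : Nat) (hj : j < m.toNat) :
    (covMap m comps).getD j 0 =
      ((comps.filter (fun t => t.2.1 ≤ (j : Int) ∧ (j : Int) ≤ t.2.2)).map (fun t => t.1)).sum := by
  have hjl : j < (covMap m comps).length := by
    rw [covMap_length]
    exact hj
  rw [List.getD_eq_getElem _ _ hjl]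
  unfold covMap
  simp only [List.getElem_map]
  have hx : (PySem.List.pyRange 0 m 1)[j]'(by
      simpa [PySem.List.length_pyRange_one] using hj) = 0 + (j : Int) :=
    PySem.List.getElem_pyRange_one 0 m j _
  simp [hx]

lemma covMap_snoc (m : Int) (comps : List (Int × Int × Int)) (t : Int × Int × Int)
    (hlo : 0 ≤ t.2.1) (hhi : t.2.2 < m) :
    covMap m (comps ++ [t]) =
      (PySem.List.pyRange t.2.1 (t.2.2 + 1) 1).foldl
        (fun a i => a.set i.toNat (a.getD i.toNat 0 + t.1)) (covMap m comps) := by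
  have hlen : (covMap m comps).length = m.toNat := covMap_length m comps
  obtain ⟨hslen, hsget⟩ := rangeAdd_foldl t.1 (t.2.2 + 1 - t.2.1).toNat t.2.2 t.2.1
    (covMap m comps) rfl hlo (by omega)
  apply List.ext_getElem
  · rw [covMap_length, hslen, hlen]
  · intro i h1 h2
    have him : i < m.toNat := by
      rw [covMap_length] at h1
      exact h1
    rw [← List.getD_eq_getElem _ (0 : Int) h1, ← List.getD_eq_getElem _ (0 : Int) h2,
      covMap_getD m (comps ++ [t]) i him, hsget i (by rw [hlen]; exact him),
      covMap_getD m comps i him, List.filter_append, List.map_append, List.sum_append]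
    by_cases hp : t.2.1 ≤ (i : Int) ∧ (i : Int) ≤ t.2.2
    · rw [if_pos hp]
      simp [List.filter, hp]
    · rw [if_neg hp]
      simp only [List.filter]
      rw [decide_eq_false hp]
      simp

lemma done_closed_reach {land : List (List Int)} {n m : Int}
    {done : PySem.Set (Int × Int)}
    (hcl : ∀ c ∈ done, ∀ d, adj land n m c d → d ∈ done)
    {a b : Int × Int} (hr : Reach land n m a b) (ha : a ∈ done) : b ∈ done := by
  induction hr with
  | refl => exact ha
  | tail hab hbc ih => exact hcl _ ih _ hbc

theorem cellStep_equiv (land : List (List Int)) (n m x y : Int) (hxy : inb n m (x, y))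
    (stA : List (List Bool) × List Int)
    (stB : PySem.Set (Int × Int) × List (Int × Int × Int))
    (hInv : OInv land n m stA.1 stA.2 stB.1 stB.2) :
    OInv land n m
      (cellStepA land n m (4 * (n.toNat * m.toNat) + 1) stA x y).1
      (cellStepA land n m (4 * (n.toNat * m.toNat) + 1) stA x y).2
      (cellStepB land n m (n.toNat * m.toNat + 2) stB x y).1
      (cellStepB land n m (n.toNat * m.toNat + 2) stB x y).2 := by
  obtain ⟨v, oilArr⟩ := stA
  obtain ⟨done, comps⟩ := stB
  obtain ⟨hD, hnd, hdone_oil, hdone_cl, hI1, hI4⟩ := hInv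
  unfold cellStepA cellStepB
  dsimp only at *
  by_cases hv : vget v x y = true
  · rw [if_pos hv]
    by_cases hcell : cellAt land x y = 0
    · rw [if_pos (Or.inl hcell)]
      exact ⟨hD, hnd, hdone_oil, hdone_cl, hI1, hI4⟩
    · have hmem : (x, y) ∈ done := (hI1 (x, y) ⟨hxy, hcell⟩).mp hv
      rw [if_pos (Or.inr ((PySem.Set.contains_iff done (x, y)).mpr hmem))]
      exact ⟨hD, hnd, hdone_oil, hdone_cl, hI1, hI4⟩
  · have hvf : vget v x y = false := by simpa using hv
    by_cases hcell : cellAt land x y = 0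
    · rw [if_neg hv, if_pos hcell, if_pos (Or.inl hcell)]
      refine ⟨dims_vset hD x y, hnd, hdone_oil, hdone_cl, ?_, hI4⟩
      intro c hoc
      have hne : ¬(c.1 = x ∧ c.2 = y) := by
        intro h
        apply hoc.2
        rw [h.1, h.2]
        exact hcell
      rw [vget_vset hD hxy hoc.1, if_neg hne]
      exact hI1 c hoc
    · -- a fresh oil seed: A floods with its stack, B expands frontiers
      have hos : oilb land n m (x, y) := ⟨hxy, hcell⟩
      have hnotdone : (x, y) ∉ done := by
        intro h
        rw [(hI1 (x, y) hos).mpr h] at hvf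
        simp at hvf
      have hdisj : ∀ c : Int × Int, Reach land n m (x, y) c → vget v c.1 c.2 = false := by
        intro c hc
        cases hvc : vget v c.1 c.2
        · rfl
        · exfalso
          have hcd : c ∈ done := (hI1 c (reach_oilb hos hc)).mp hvc
          have hback : Reach land n m c (x, y) :=
            Relation.ReflTransGen.symmetric (adj_symm land n m) hc
          exact hnotdone (done_closed_reach hdone_cl hback hcd)
      have hcellsle : (cells n m).length = m.toNat * n.toNat := length_cells n m
      have hmulcomm : m.toNat * n.toNat = n.toNat * m.toNat := Nat.mul_comm _ _
      have hunvis : unvis n m v ≤ (cells n m).length := List.countP_le_length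
      have FS := flood_seed land n m (x, y) v hD hos hdisj (4 * (n.toNat * m.toNat) + 1)
        (by omega)
      obtain ⟨q1, q2, q3, ⟨q4w, q4b⟩, ⟨q5w, q5b⟩⟩ := FS
      have BB := bfs_main land n m (x, y) hos (n.toNat * m.toNat + 2) [(x, y)] [(x, y)]
        (List.nodup_singleton _) (by simp)
        (by
          intro c hc
          rw [List.mem_singleton.mp hc]
          exact Relation.ReflTransGen.refl)
        (fun c hc => hc)
        (by
          intro c hc hcn
          rw [List.mem_singleton.mp hc] at hcn
          simp at hcn)
        (by omega)
      obtain ⟨hBnd, hBmem⟩ := BB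
      rw [if_neg hv, if_neg hcell,
        if_neg (by
          rintro (h | h)
          · exact hcell h
          · exact hnotdone ((PySem.Set.contains_iff done (x, y)).mp h))]
      dsimp only
      set r := floodA land n m (4 * (n.toNat * m.toNat) + 1) [(x, y)] v 0 x x with hr
      set comp := bfsB land n m (n.toNat * m.toNat + 2) [(x, y)] [(x, y)] with hcomp
      have hsz : r.2.1 = (comp.length : Int) := by
        rw [q3, comp_length_eq_reachCount hos hBnd hBmem]
      have hlo : (PySem.List.min? (comp.map (fun c => c.1)) (fun z => z)).getD 0 = r.2.2.1 :=
        min_col_eq hBmem q4w q4b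
      have hhi : (PySem.List.max? (comp.map (fun c => c.1)) (fun z => z)).getD 0 = r.2.2.2 :=
        max_col_eq hBmem q5w q5b
      have hlo0 : 0 ≤ r.2.2.1 := by
        obtain ⟨c, hcr, hcx⟩ := q4w
        rw [← hcx]
        exact (reach_oilb hos hcr).1.1
      have hhim : r.2.2.2 < m := by
        obtain ⟨c, hcr, hcx⟩ := q5w
        rw [← hcx]
        exact (reach_oilb hos hcr).1.2.1
      refine ⟨q1, PySem.Set.nodup_update _ _ hnd, ?_, ?_, ?_, ?_⟩
      · intro c hc
        rcases (PySem.Set.mem_update _ _ _).mp hc with h | h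
        · exact hdone_oil c h
        · exact reach_oilb hos ((hBmem c).mp h)
      · intro c hc d hadj
        rcases (PySem.Set.mem_update _ _ _).mp hc with h | h
        · exact (PySem.Set.mem_update _ _ _).mpr (Or.inl (hdone_cl c h d hadj))
        · exact (PySem.Set.mem_update _ _ _).mpr
            (Or.inr ((hBmem d).mpr (((hBmem c).mp h).tail hadj)))
      · intro c hoc
        rw [q2 c hoc, PySem.Set.mem_update]
        constructor
        · rintro (h | h)
          · exact Or.inl ((hI1 c hoc).mp h)
          · exact Or.inr ((hBmem c).mpr h)
        · rintro (h | h)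
          · exact Or.inl ((hI1 c hoc).mpr h)
          · exact Or.inr ((hBmem c).mp h)
      · rw [covMap_snoc m comps _ (by dsimp only; rw [hlo]; exact hlo0)
          (by dsimp only; rw [hhi]; exact hhim)]
        dsimp only
        rw [← hI4, hlo, hhi]
        simp only [hsz]

lemma foldx (land : List (List Int)) (n m y : Int) (hy : 0 ≤ y ∧ y < n) :
    ∀ (l : List Int), (∀ x ∈ l, 0 ≤ x ∧ x < m) →
    ∀ (stA : List (List Bool) × List Int)
      (stB : PySem.Set (Int × Int) × List (Int × Int × Int)),
    OInv land n m stA.1 stA.2 stB.1 stB.2 →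
    OInv land n m
      (l.foldl (fun st x => cellStepA land n m (4 * (n.toNat * m.toNat) + 1) st x y) stA).1
      (l.foldl (fun st x => cellStepA land n m (4 * (n.toNat * m.toNat) + 1) st x y) stA).2
      (l.foldl (fun st x => cellStepB land n m (n.toNat * m.toNat + 2) st x y) stB).1
      (l.foldl (fun st x => cellStepB land n m (n.toNat * m.toNat + 2) st x y) stB).2 := by
  intro l
  induction l with
  | nil => exact fun _ stA stB h => h
  | cons x t ih =>
    intro hmem stA stB h
    rw [List.foldl_cons, List.foldl_cons]
    refine ih (fun z hz => hmem z (by simp [hz])) _ _ ?_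
    have hx := hmem x (by simp)
    exact cellStep_equiv land n m x y ⟨hx.1, hx.2, hy.1, hy.2⟩ stA stB h

lemma foldy (land : List (List Int)) (n m : Int) :
    ∀ (ly : List Int), (∀ y ∈ ly, 0 ≤ y ∧ y < n) →
    ∀ (stA : List (List Bool) × List Int)
      (stB : PySem.Set (Int × Int) × List (Int × Int × Int)),
    OInv land n m stA.1 stA.2 stB.1 stB.2 →
    OInv land n m
      (ly.foldl (fun st y => (PySem.List.pyRange 0 m 1).foldl
        (fun st x => cellStepA land n m (4 * (n.toNat * m.toNat) + 1) st x y) st) stA).1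
      (ly.foldl (fun st y => (PySem.List.pyRange 0 m 1).foldl
        (fun st x => cellStepA land n m (4 * (n.toNat * m.toNat) + 1) st x y) st) stA).2
      (ly.foldl (fun st y => (PySem.List.pyRange 0 m 1).foldl
        (fun st x => cellStepB land n m (n.toNat * m.toNat + 2) st x y) st) stB).1
      (ly.foldl (fun st y => (PySem.List.pyRange 0 m 1).foldl
        (fun st x => cellStepB land n m (n.toNat * m.toNat + 2) st x y) st) stB).2 := by
  intro ly
  induction ly with
  | nil => exact fun _ stA stB h => h
  | cons y t ih =>
    intro hmem stA stB h
    rw [List.foldl_cons, List.foldl_cons]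
    refine ih (fun z hz => hmem z (by simp [hz])) _ _ ?_
    exact foldx land n m y (hmem y (by simp)) (PySem.List.pyRange 0 m 1)
      (fun x hx => by
        have := PySem.List.mem_pyRange_one.mp hx
        omega) stA stB h

lemma row_false (m : Int) (i : Nat) :
    ((PySem.List.pyRange 0 m 1).map (fun _ => false)).getD i false = false := by
  by_cases h : i < ((PySem.List.pyRange 0 m 1).map (fun _ : Int => false)).length
  · rw [List.getD_eq_getElem _ _ h, List.getElem_map]
  · rw [List.getD_eq_default _ _ (by omega)]

lemma vget_v0 (n m a b : Int) :
    vget ((PySem.List.pyRange 0 n 1).map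
      (fun _ => (PySem.List.pyRange 0 m 1).map (fun _ => false))) a b = false := by
  unfold vget
  by_cases hb : b.toNat < ((PySem.List.pyRange 0 n 1).map
      (fun _ => (PySem.List.pyRange 0 m 1).map (fun _ => false))).length
  · rw [List.getD_eq_getElem (l := (PySem.List.pyRange 0 n 1).map
      (fun _ => (PySem.List.pyRange 0 m 1).map (fun _ => false))) _ hb, List.getElem_map]
    exact row_false m a.toNat
  · rw [List.getD_eq_default (l := (PySem.List.pyRange 0 n 1).map
      (fun _ => (PySem.List.pyRange 0 m 1).map (fun _ => false))) _ (by omega)]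
    simp

lemma OInv_init (land : List (List Int)) (n m : Int) :
    OInv land n m
      ((PySem.List.pyRange 0 n 1).map
        (fun _ => (PySem.List.pyRange 0 m 1).map (fun _ => false)))
      (List.replicate m.toNat 0) [] [] := by
  refine ⟨⟨by simp [PySem.List.length_pyRange_one], ?_⟩, List.nodup_nil, by simp, by simp, ?_, ?_⟩
  · intro rrow hrow
    obtain ⟨_, _, rfl⟩ := List.mem_map.mp hrow
    simp [PySem.List.length_pyRange_one]
  · intro c _
    rw [vget_v0]
    simp
  · have : covMap m [] = List.replicate m.toNat 0 := by
      unfold covMap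
      rw [List.eq_replicate_iff]
      constructor
      · simp [PySem.List.length_pyRange_one]
      · intro b hb
        obtain ⟨_, _, rfl⟩ := List.mem_map.mp hb
        simp
    exact this.symm

theorem solution_eq (land : List (List Int)) : solution land = solution_alt land := by
  unfold solution solution_alt
  dsimp only
  have hfold := foldy land (land.length : Int) ((PySem.List.pyGetD land 0 []).length : Int)
    (PySem.List.pyRange 0 (land.length : Int) 1)
    (fun z hz => by
      have := PySem.List.mem_pyRange_one.mp hz
      omega)
    (((PySem.List.pyRange 0 (land.length : Int) 1).map
        (fun _ => (PySem.List.pyRange 0 ((PySem.List.pyGetD land 0 []).length : Int) 1).map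
          (fun _ => false))),
      (List.replicate ((PySem.List.pyGetD land 0 []).length : Int).toNat 0))
    ([], [])
    (OInv_init land (land.length : Int) ((PySem.List.pyGetD land 0 []).length : Int))
  obtain ⟨_, _, _, _, _, hI4⟩ := hfold
  rw [hI4]
  rfl
-- ===== VERDICT (by name: the statement is the Claim_ definition above) =====
theorem solution_spec : Claim_equal_solution := by
  intro land _ _
  unfold Spec_solution
  exact solution_eq land
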